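-- pv_equiv track=rewrite | github.com/PIC4SeR/Social-Nav-Metrics-Matching | social_metrics_match/utils/data_organization.py | separate_HM_QM_dict_lab_data
-- ===== SOURCE A (Python) =====
-- def separate_HM_QM_dict_lab_data(data : dict):
--     """
--     This function separates the data into quantitative and qualitative data, ending up with a dictionary for quantitative and qualitative data
--     Every entry is its own dict
--
--     For each experiment and label grouping, split each record into two subdictionaries:
--     'quantitative' (all keys from quantitative_keys) and 'qualitative' (all keys from qualitative_keys).
--     The resulting structure maps each record to a dictionary holding both subdictionaries.
--     Adjust qualitative_keys and quantitative_keys as needed.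
--     """
--     qualitative_keys = {"unobtrusiveness", "friendliness", "smoothness", "avoidance foresight"}
--     quantitative_keys = {"time to goal", "path length", "cumulative heading changes", "average robot linear speed",
--                           "social work", "social work per second", "average minimum distance",
--                           "intimate space intrusion","personal space intrusion","social space intrusion","public space occupancy"
--                          }
--     new_data = {}
--     for experiment, label_groups in data.items():
--         new_data[experiment] = {}
--         for label, records in label_groups.items():
--             split_record = {"quantitative": {}, "qualitative": {}}
--             for record in records:
--                 quantitative_dict = {}
--                 qualitative_dict = {}
--                 for key, value in record.items():
--                     if key in qualitative_keys:
--                         qualitative_dict[key] = value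
--                     elif key in quantitative_keys:
--                         quantitative_dict[key] = value
--                 split_record["quantitative"] = quantitative_dict
--                 split_record["qualitative"] = qualitative_dict
--             new_data[experiment][label] = split_record
--     return new_data
-- ===== SOURCE B (Python) =====
-- def separate_HM_QM_dict_lab_data(data : dict):
--     """Split each experiment/label group's records; only the last record matters,
--     so take it directly and build both sub-dicts by filtering its items."""
--     qualitative_keys = {"unobtrusiveness", "friendliness", "smoothness", "avoidance foresight"}
--     quantitative_keys = {"time to goal", "path length", "cumulative heading changes", "average robot linear speed",
--                           "social work", "social work per second", "average minimum distance",
--                           "intimate space intrusion","personal space intrusion","social space intrusion","public space occupancy"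
--                          }
--     return {
--         experiment: {
--             label: {
--                 "quantitative": {k: v for k, v in last.items() if k in quantitative_keys},
--                 "qualitative": {k: v for k, v in last.items() if k in qualitative_keys},
--             }
--             for label, records in label_groups.items()
--             for last in [records[-1] if records else {}]
--         }
--         for experiment, label_groups in data.items()
--     }
-- ===== Notes on version B (the rewrite author's own statement) =====
-- stated objective: simpler
-- what changed: A loops over every record and re-splits each one, keeping only the last split; B takes the last record of each label group directly and builds the two sub-dicts as filtering dict comprehensions over that single record, as one nested comprehension.
import Mathlib
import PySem

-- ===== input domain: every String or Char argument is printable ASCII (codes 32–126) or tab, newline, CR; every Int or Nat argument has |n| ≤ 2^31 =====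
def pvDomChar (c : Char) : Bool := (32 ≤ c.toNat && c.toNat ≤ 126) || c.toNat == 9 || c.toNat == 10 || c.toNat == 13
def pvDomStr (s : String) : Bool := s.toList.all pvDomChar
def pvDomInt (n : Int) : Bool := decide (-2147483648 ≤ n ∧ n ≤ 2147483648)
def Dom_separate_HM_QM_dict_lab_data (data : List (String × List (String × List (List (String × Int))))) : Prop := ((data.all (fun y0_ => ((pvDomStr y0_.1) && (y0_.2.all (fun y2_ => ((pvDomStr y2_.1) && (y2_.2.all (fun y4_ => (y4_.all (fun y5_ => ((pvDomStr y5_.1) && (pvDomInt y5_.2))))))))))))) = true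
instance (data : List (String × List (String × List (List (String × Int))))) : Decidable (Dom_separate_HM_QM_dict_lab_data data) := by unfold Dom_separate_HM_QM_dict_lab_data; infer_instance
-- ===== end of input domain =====

-- B replaces A's loop over all records (each overwriting the previous split) by taking
-- records[-1] directly and building both sub-dicts as filtering comprehensions (simpler).

-- ===== PORT A =====
def pvQualKeys : PySem.Set String :=
  PySem.Set.ofList ["unobtrusiveness", "friendliness", "smoothness", "avoidance foresight"]
def pvQuantKeys : PySem.Set String :=
  PySem.Set.ofList ["time to goal", "path length", "cumulative heading changes",
    "average robot linear speed", "social work", "social work per second",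
    "average minimum distance", "intimate space intrusion", "personal space intrusion",
    "social space intrusion", "public space occupancy"]

def separate_HM_QM_dict_lab_data (data : List (String × List (String × List (List (String × Int))))) : List (String × List (String × List (String × List (String × Int)))) :=
  (data.foldl (fun (new_data : PySem.Dict String (List (String × List (String × List (String × Int))))) exp =>
    let inner : PySem.Dict String (List (String × List (String × Int))) :=
      exp.2.foldl (fun acc lg =>
        let split_record : PySem.Dict String (List (String × Int)) :=
          lg.2.foldl (fun sr record =>
            let pair : PySem.Dict String Int × PySem.Dict String Int :=
              record.foldl (fun acc2 kv =>
                if PySem.Set.contains pvQualKeys kv.1 then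
                  (acc2.1, PySem.Dict.insert acc2.2 kv.1 kv.2)
                else if PySem.Set.contains pvQuantKeys kv.1 then
                  (PySem.Dict.insert acc2.1 kv.1 kv.2, acc2.2)
                else acc2)
                (PySem.Dict.empty, PySem.Dict.empty)
            PySem.Dict.insert (PySem.Dict.insert sr "quantitative" pair.1.items) "qualitative" pair.2.items)
          (PySem.Dict.insert (PySem.Dict.insert PySem.Dict.empty "quantitative" []) "qualitative" [])
        PySem.Dict.insert acc lg.1 split_record.items)
        PySem.Dict.empty
    PySem.Dict.insert new_data exp.1 inner.items)
    PySem.Dict.empty).items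

-- ===== PORT B =====
-- {k: v for k, v in xs if <key test>} : build a dict by inserting each passing pair
def pvDictOf (xs : List (String × Int)) : PySem.Dict String Int :=
  xs.foldl (fun d kv => PySem.Dict.insert d kv.1 kv.2) PySem.Dict.empty

def separate_HM_QM_dict_lab_data_alt (data : List (String × List (String × List (List (String × Int))))) : List (String × List (String × List (String × List (String × Int)))) :=
  (data.foldl (fun (nd : PySem.Dict String (List (String × List (String × List (String × Int))))) exp =>
    PySem.Dict.insert nd exp.1
      ((exp.2.foldl (fun (m : PySem.Dict String (List (String × List (String × Int)))) lg =>
        -- records[-1] if records else {}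
        let last : List (String × Int) := (PySem.List.pyGet? lg.2 (-1)).getD []
        PySem.Dict.insert m lg.1
          [("quantitative", (pvDictOf (last.filter (fun kv => PySem.Set.contains pvQuantKeys kv.1))).items),
           ("qualitative",  (pvDictOf (last.filter (fun kv => PySem.Set.contains pvQualKeys kv.1))).items)])
        PySem.Dict.empty).items))
    PySem.Dict.empty).items

-- ===== PRECONDITION & SPEC =====
def Spec_separate_HM_QM_dict_lab_data (data : List (String × List (String × List (List (String × Int))))) (out : List (String × List (String × List (String × List (String × Int))))) : Prop := out = separate_HM_QM_dict_lab_data_alt data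
set_option maxHeartbeats 1000000 in
instance (data : List (String × List (String × List (List (String × Int))))) (out : List (String × List (String × List (String × List (String × Int))))) : Decidable (Spec_separate_HM_QM_dict_lab_data data out) := by
  unfold Spec_separate_HM_QM_dict_lab_data
  letI i1 : DecidableEq (String × Int) := inferInstance
  letI i2 : DecidableEq (String × List (String × Int)) := inferInstance
  letI i3 : DecidableEq (String × List (String × List (String × Int))) := inferInstance
  letI i4 : DecidableEq (String × List (String × List (String × List (String × Int)))) := inferInstance
  exact instDecidableEqList out (separate_HM_QM_dict_lab_data_alt data)

-- ===== CLAIM (what is proved, stated in full; the proofs are below) =====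
def Claim_equal_separate_HM_QM_dict_lab_data : Prop := ∀ (data : List (String × List (String × List (List (String × Int))))), Dom_separate_HM_QM_dict_lab_data data → Spec_separate_HM_QM_dict_lab_data data (separate_HM_QM_dict_lab_data data)

-- ===== LEMMAS AND PROOFS =====

-- the two key schemas are disjoint
theorem pvKeys_disjoint (k : String) (h : k ∈ pvQualKeys) : k ∉ pvQuantKeys := by
  simp only [pvQualKeys, pvQuantKeys, PySem.Set.mem_ofList,
    List.mem_cons, List.not_mem_nil, or_false] at h ⊢
  rcases h with rfl | rfl | rfl | rfl <;> decide

-- A's per-record loop = the two filtered insert-folds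
theorem pvRecord_split (record : List (String × Int)) (a b : PySem.Dict String Int) :
    record.foldl (fun acc2 kv =>
        if PySem.Set.contains pvQualKeys kv.1 then
          (acc2.1, PySem.Dict.insert acc2.2 kv.1 kv.2)
        else if PySem.Set.contains pvQuantKeys kv.1 then
          (PySem.Dict.insert acc2.1 kv.1 kv.2, acc2.2)
        else acc2) (a, b)
    = ((record.filter (fun kv => PySem.Set.contains pvQuantKeys kv.1)).foldl
         (fun d kv => PySem.Dict.insert d kv.1 kv.2) a,
       (record.filter (fun kv => PySem.Set.contains pvQualKeys kv.1)).foldl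
         (fun d kv => PySem.Dict.insert d kv.1 kv.2) b) := by
  induction record generalizing a b with
  | nil => rfl
  | cons kv rest ih =>
    simp only [PySem.Set.contains_iff] at ih
    by_cases hql : kv.1 ∈ pvQualKeys
    · have hqt := pvKeys_disjoint kv.1 hql
      simp [hql, hqt, ih]
    · by_cases hqt : kv.1 ∈ pvQuantKeys
      · simp [hql, hqt, ih]
      · simp [hql, hqt, ih]

-- inserting at the two fixed keys of the two-entry split dict just replaces the entries
theorem pvInsert_mk2 (x y x' y' : List (String × Int)) :
    PySem.Dict.insert (PySem.Dict.insert (PySem.Dict.mk [("quantitative", x), ("qualitative", y)]) "quantitative" x') "qualitative" y'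
      = PySem.Dict.mk [("quantitative", x'), ("qualitative", y')] := by
  simp [PySem.Dict.insert, PySem.Dict.contains]

theorem pvInit_mk2 :
    PySem.Dict.insert (PySem.Dict.insert (PySem.Dict.empty) "quantitative" ([] : List (String × Int))) "qualitative" []
      = PySem.Dict.mk [("quantitative", []), ("qualitative", [])] := by
  simp [PySem.Dict.insert, PySem.Dict.empty, PySem.Dict.contains]

-- A's loop over the records of one label (per-record step already in filtered form)
-- keeps only the last record's split
theorem pvRecords_last (records : List (List (String × Int))) (x y : List (String × Int)) :
    records.foldl (fun sr record =>
        PySem.Dict.insert (PySem.Dict.insert sr "quantitative"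
            (List.foldl (fun d kv => PySem.Dict.insert d kv.1 kv.2) PySem.Dict.empty
              (List.filter (fun kv => PySem.Set.contains pvQuantKeys kv.1) record)).items)
          "qualitative"
          (List.foldl (fun d kv => PySem.Dict.insert d kv.1 kv.2) PySem.Dict.empty
              (List.filter (fun kv => PySem.Set.contains pvQualKeys kv.1) record)).items)
      (PySem.Dict.mk [("quantitative", x), ("qualitative", y)])
    = match records.getLast? with
      | none => PySem.Dict.mk [("quantitative", x), ("qualitative", y)]
      | some r => PySem.Dict.mk
          [("quantitative", (pvDictOf (r.filter (fun kv => PySem.Set.contains pvQuantKeys kv.1))).items),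
           ("qualitative",  (pvDictOf (r.filter (fun kv => PySem.Set.contains pvQualKeys kv.1))).items)] := by
  induction records generalizing x y with
  | nil => rfl
  | cons r rest ih =>
    simp only [List.foldl_cons, pvInsert_mk2]
    rw [ih]
    cases rest with
    | nil => simp [pvDictOf]
    | cons r2 rest2 =>
      rw [List.getLast?_cons_cons]
      cases hl : (r2 :: rest2).getLast? with
      | none =>
        rw [List.getLast?_eq_none_iff] at hl
        exact absurd hl (by simp)
      | some r' => simp [pvDictOf]

-- records[-1] agrees with getLast? (with [] for the empty list)
theorem pvLast_eq (records : List (List (String × Int))) :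
    (PySem.List.pyGet? records (-1)).getD [] = (records.getLast?).getD [] := by
  cases records with
  | nil => rfl
  | cons r rest =>
    simp [PySem.List.pyGet?, PySem.List.pyIdx?, List.getLast?_eq_getElem?]

-- A's value for one label equals B's value for that label
theorem pvLabelVal_eq (records : List (List (String × Int))) :
    (records.foldl (fun sr record =>
        let pair : PySem.Dict String Int × PySem.Dict String Int :=
          record.foldl (fun acc2 kv =>
            if PySem.Set.contains pvQualKeys kv.1 then
              (acc2.1, PySem.Dict.insert acc2.2 kv.1 kv.2)
            else if PySem.Set.contains pvQuantKeys kv.1 then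
              (PySem.Dict.insert acc2.1 kv.1 kv.2, acc2.2)
            else acc2) (PySem.Dict.empty, PySem.Dict.empty)
        PySem.Dict.insert (PySem.Dict.insert sr "quantitative" pair.1.items) "qualitative" pair.2.items)
      (PySem.Dict.insert (PySem.Dict.insert PySem.Dict.empty "quantitative" []) "qualitative" [])).items
    = [("quantitative", (pvDictOf (((PySem.List.pyGet? records (-1)).getD []).filter (fun kv => PySem.Set.contains pvQuantKeys kv.1))).items),
       ("qualitative",  (pvDictOf (((PySem.List.pyGet? records (-1)).getD []).filter (fun kv => PySem.Set.contains pvQualKeys kv.1))).items)] := by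
  simp only [pvRecord_split]
  rw [pvInit_mk2, pvRecords_last, pvLast_eq]
  cases hl : records.getLast? with
  | none => simp [pvDictOf, PySem.Dict.empty]
  | some r => simp [pvDictOf]

-- ===== VERDICT (by name: the statement is the Claim_ definition above) =====
theorem separate_HM_QM_dict_lab_data_spec : Claim_equal_separate_HM_QM_dict_lab_data := by
  intro data _
  unfold Spec_separate_HM_QM_dict_lab_data separate_HM_QM_dict_lab_data separate_HM_QM_dict_lab_data_alt
  simp only [pvLabelVal_eq]
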